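-- pv_equiv track=rewrite | github.com/Santhakumarramesh/job-automation | agents/master_resume_guard.py | get_unsupported_requirements
-- ===== SOURCE A (Python) =====
-- from dataclasses import dataclass, field
-- from typing import Optional, Union
--
-- @dataclass
-- class CandidateProfile:
--     """Full inventory from master resume. Central gatekeeper for job fit."""
--     skills: set = field(default_factory=set)
--     tools: set = field(default_factory=set)
--     projects: set = field(default_factory=set)
--     education: set = field(default_factory=set)
--     companies: set = field(default_factory=set)
--     locations: list = field(default_factory=list)
--     visa_status: str = ""
--     work_authorization: str = ""
--     github_url: str = ""
--     linkedin_url: str = ""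
--     portfolio_url: str = ""
--     preferred_roles: list = field(default_factory=list)
--     years_experience: dict = field(default_factory=dict)
--     raw_text_lower: str = ""
--
--     def to_dict(self) -> dict:
--         """Legacy: dict format for get_truthful_missing_keywords etc."""
--         return {
--             "skills": self.skills,
--             "tools": self.tools,
--             "projects": self.projects,
--             "education": self.education,
--             "companies": self.companies,
--             "raw_text_lower": self.raw_text_lower,
--         }
--
--     def allowed_skills_list(self) -> list:
--         """Skills + tools as list for tailor_resume allowed_skills."""
--         return list(self.skills | self.tools)
--
-- def _as_inventory(master_inventory: Union[CandidateProfile, dict]) -> dict: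
--     """Normalize to dict for skills/tools access."""
--     if isinstance(master_inventory, CandidateProfile):
--         return master_inventory.to_dict()
--     return master_inventory
--
-- def get_unsupported_requirements(
--     jd_keywords: list[str],
--     master_inventory: Union[CandidateProfile, dict],
-- ) -> list[str]:
--     """
--     Return JD requirements that are NOT supported by master resume.
--     These would require fake additions to hit 100 ATS.
--     """
--     inv = _as_inventory(master_inventory)
--     allowed = inv.get("skills", set()) | inv.get("tools", set())
--     allowed_lower = {s.lower() for s in allowed}
--     unsupported = []
--     for kw in jd_keywords:
--         k = kw.lower().strip()
--         if not k or len(k) < 3: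
--             continue
--         found = k in allowed_lower
--         if not found:
--             for a in allowed_lower:
--                 if k in a or a in k:
--                     found = True
--                     break
--         if not found:
--             unsupported.append(kw)
--     return unsupported
-- ===== SOURCE B (Python) =====
-- def get_unsupported_requirements(jd_keywords, master_inventory):
--     """Sieve formulation: start from the candidate keywords and let each allowed
--     skill/tool eliminate, in one pass, every keyword it substring-matches."""
--     inv = master_inventory.to_dict() if hasattr(master_inventory, "to_dict") else master_inventory
--     lows = [s.lower() for s in inv.get("skills", set()) | inv.get("tools", set())]
--     pending = [(kw, k) for kw in jd_keywords for k in (kw.lower().strip(),) if len(k) >= 3]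
--     for a in lows:
--         pending = [(kw, k) for (kw, k) in pending if not (k in a or a in k)]
--     return [kw for kw, _ in pending]
-- ===== Notes on version B (the rewrite author's own statement) =====
-- stated objective: alternative
-- what changed: Inverts the traversal: instead of scanning the whole allowed set per keyword with a found-flag and a separate exact-membership precheck, B pre-filters the keywords once and then loops over the allowed strings, each pass sieving out the keywords it substring-matches; the redundant exact-membership test and the set-dedup disappear.
import Mathlib
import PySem

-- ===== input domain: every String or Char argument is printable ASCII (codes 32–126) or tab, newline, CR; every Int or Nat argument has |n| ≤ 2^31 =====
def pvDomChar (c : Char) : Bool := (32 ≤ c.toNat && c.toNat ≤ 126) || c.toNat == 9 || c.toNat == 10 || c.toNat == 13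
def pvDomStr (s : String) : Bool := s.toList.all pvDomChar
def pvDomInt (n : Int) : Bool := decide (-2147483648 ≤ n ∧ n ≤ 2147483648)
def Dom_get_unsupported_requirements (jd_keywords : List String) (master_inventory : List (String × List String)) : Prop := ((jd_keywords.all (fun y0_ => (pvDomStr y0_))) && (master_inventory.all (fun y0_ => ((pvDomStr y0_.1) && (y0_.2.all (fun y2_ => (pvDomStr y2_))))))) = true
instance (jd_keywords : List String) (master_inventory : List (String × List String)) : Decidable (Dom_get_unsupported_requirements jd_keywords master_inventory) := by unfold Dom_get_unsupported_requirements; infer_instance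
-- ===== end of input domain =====

-- B replaces A's per-keyword scan (found-flag + exact-membership precheck) by a sieve:
-- one pre-filter of the keywords, then each allowed string eliminates the keywords it
-- substring-matches; same cost class, different traversal (objective: alternative).


-- ===== PORT A =====
def get_unsupported_requirements (jd_keywords : List String) (master_inventory : List (String × List String)) : List String :=
  -- inv = _as_inventory(master_inventory): the argument is already the dict form here
  -- allowed = inv.get("skills", set()) | inv.get("tools", set())
  let allowed : PySem.Set String :=
    PySem.Set.union (PySem.Dict.getD ⟨master_inventory⟩ "skills" [])
                    (PySem.Dict.getD ⟨master_inventory⟩ "tools" [])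
  -- allowed_lower = {s.lower() for s in allowed}
  let allowed_lower : PySem.Set String := PySem.Set.ofList (allowed.map PySem.Str.lower)
  -- for kw in jd_keywords: … unsupported.append(kw)
  jd_keywords.foldl (fun unsupported kw =>
    let k := PySem.Str.strip (PySem.Str.lower kw)
    if k = "" ∨ PySem.Str.len k < 3 then unsupported
    else
      let found := PySem.Set.contains allowed_lower k
      -- if not found: for a in allowed_lower: if k in a or a in k: found = True; break
      let found := found || allowed_lower.any (fun a => PySem.Str.isIn k a || PySem.Str.isIn a k)
      if found then unsupported else unsupported ++ [kw]) []

-- ===== PORT B =====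
def get_unsupported_requirements_alt (jd_keywords : List String) (master_inventory : List (String × List String)) : List String :=
  -- lows = [s.lower() for s in inv.get("skills", set()) | inv.get("tools", set())]
  let lows : List String :=
    (PySem.Set.union (PySem.Dict.getD ⟨master_inventory⟩ "skills" [])
                     (PySem.Dict.getD ⟨master_inventory⟩ "tools" [])).map PySem.Str.lower
  -- pending = [(kw, k) for kw in jd_keywords for k in (kw.lower().strip(),) if len(k) >= 3]
  let pending : List (String × String) := jd_keywords.filterMap (fun kw =>
    let k := PySem.Str.strip (PySem.Str.lower kw)
    if 3 ≤ PySem.Str.len k then some (kw, k) else none)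
  -- for a in lows: pending = [(kw, k) for (kw, k) in pending if not (k in a or a in k)]
  let final := lows.foldl (fun p a =>
    p.filter (fun x => !(PySem.Str.isIn x.2 a || PySem.Str.isIn a x.2))) pending
  -- return [kw for kw, _ in pending]
  final.map Prod.fst

-- ===== PRECONDITION & SPEC =====
def Spec_get_unsupported_requirements (jd_keywords : List String) (master_inventory : List (String × List String)) (out : List String) : Prop := out = get_unsupported_requirements_alt jd_keywords master_inventory
instance (jd_keywords : List String) (master_inventory : List (String × List String)) (out : List String) : Decidable (Spec_get_unsupported_requirements jd_keywords master_inventory out) := by unfold Spec_get_unsupported_requirements; infer_instance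

-- ===== CLAIM (what is proved, stated in full; the proofs are below) =====
def Claim_equal_get_unsupported_requirements : Prop := ∀ (jd_keywords : List String) (master_inventory : List (String × List String)), Dom_get_unsupported_requirements jd_keywords master_inventory → Spec_get_unsupported_requirements jd_keywords master_inventory (get_unsupported_requirements jd_keywords master_inventory)

-- ===== LEMMAS AND PROOFS =====

-- named forms of the predicates both ports test (proof-side only)
def pvKey (kw : String) : String := PySem.Str.strip (PySem.Str.lower kw)

def pvRel (k a : String) : Bool := PySem.Str.isIn k a || PySem.Str.isIn a k

def pvOkA (L : PySem.Set String) (kw : String) : Bool :=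
  !decide (pvKey kw = "" ∨ PySem.Str.len (pvKey kw) < 3) &&
    !(PySem.Set.contains L (pvKey kw) || L.any (fun a => pvRel (pvKey kw) a))

def pvOkB (lows : List String) (x : String × String) : Bool :=
  lows.all (fun a => !(pvRel x.2 a))

def pvPend (kw : String) : Option (String × String) :=
  if 3 ≤ PySem.Str.len (pvKey kw) then some (kw, pvKey kw) else none

theorem pvRel_self (k : String) : pvRel k k = true := by
  have h : PySem.Chars.isIn k.toList k.toList = true := by
    rw [PySem.Chars.isIn_iff_infix]
  simp [pvRel, h]

-- A's loop body written as a single conditional append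
theorem pv_bodyA (L : PySem.Set String) :
    (fun (unsupported : List String) (kw : String) =>
      let k := PySem.Str.strip (PySem.Str.lower kw)
      if k = "" ∨ PySem.Str.len k < 3 then unsupported
      else
        let found := PySem.Set.contains L k
        let found := found || L.any (fun a => PySem.Str.isIn k a || PySem.Str.isIn a k)
        if found then unsupported else unsupported ++ [kw])
    = (fun unsupported kw => if pvOkA L kw then unsupported ++ [kw] else unsupported) := by
  funext acc kw
  show (if pvKey kw = "" ∨ PySem.Str.len (pvKey kw) < 3 then acc
        else if (PySem.Set.contains L (pvKey kw) ||
            L.any (fun a => PySem.Str.isIn (pvKey kw) a || PySem.Str.isIn a (pvKey kw))) = true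
          then acc else acc ++ [kw])
      = (if pvOkA L kw = true then acc ++ [kw] else acc)
  by_cases h1 : pvKey kw = "" ∨ PySem.Str.len (pvKey kw) < 3
  · have hA : pvOkA L kw = false := by
      rw [pvOkA, decide_eq_true h1]
      simp only [Bool.not_true, Bool.false_and]
    rw [if_pos h1, hA]
    simp only [Bool.false_eq_true, if_false]
  · rw [if_neg h1]
    by_cases h2 : (PySem.Set.contains L (pvKey kw) || L.any (fun a => pvRel (pvKey kw) a)) = true
    · have hA : pvOkA L kw = false := by
        rw [pvOkA, h2]
        simp only [Bool.not_true, Bool.and_false]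
      rw [hA, if_pos (show (PySem.Set.contains L (pvKey kw) ||
            L.any (fun a => PySem.Str.isIn (pvKey kw) a || PySem.Str.isIn a (pvKey kw))) = true from h2)]
      simp only [Bool.false_eq_true, if_false]
    · have hA : pvOkA L kw = true := by
        rw [pvOkA, decide_eq_false h1, Bool.eq_false_iff.mpr h2]
        simp only [Bool.not_false, Bool.and_self]
      rw [hA, if_neg (show ¬ (PySem.Set.contains L (pvKey kw) ||
            L.any (fun a => PySem.Str.isIn (pvKey kw) a || PySem.Str.isIn a (pvKey kw))) = true from h2)]
      simp only [if_true]

-- the conditional-append loop is a filter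
theorem pv_foldA (L : PySem.Set String) (jd : List String) (acc : List String) :
    jd.foldl (fun unsupported kw => if pvOkA L kw then unsupported ++ [kw] else unsupported) acc
      = acc ++ jd.filter (pvOkA L) := by
  induction jd generalizing acc with
  | nil => simp
  | cons kw rest ih =>
    rw [List.foldl_cons]
    by_cases h : pvOkA L kw = true
    · rw [if_pos h, ih, List.filter_cons_of_pos h]
      simp
    · rw [if_neg h, ih, List.filter_cons_of_neg (by simpa using h)]

-- B's sieve loop is one filter by "no allowed string matches"
theorem pv_sieve (lows : List String) (p : List (String × String)) :
    lows.foldl (fun p a =>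
        p.filter (fun x => !(PySem.Str.isIn x.2 a || PySem.Str.isIn a x.2))) p
      = p.filter (pvOkB lows) := by
  induction lows generalizing p with
  | nil =>
    rw [List.foldl_nil, show pvOkB [] = (fun _ => true) from rfl, List.filter_true]
  | cons a rest ih =>
    rw [List.foldl_cons, ih, List.filter_filter]
    have h : (fun x => pvOkB rest x && !(PySem.Str.isIn x.2 a || PySem.Str.isIn a x.2))
        = pvOkB (a :: rest) := by
      funext x
      simp only [pvOkB, pvRel, List.all_cons, Bool.and_comm]
    rw [h]

-- A's test against the deduplicated set = "some allowed string matches"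
theorem pv_anyL_iff (lows : List String) (k : String) :
    (PySem.Set.contains (PySem.Set.ofList lows) k ||
      (PySem.Set.ofList lows).any (fun a => pvRel k a)) = true ↔
      ∃ a ∈ lows, pvRel k a = true := by
  constructor
  · intro h
    rcases Bool.or_eq_true_iff.mp h with h | h
    · exact ⟨k, (PySem.Set.mem_ofList lows k).mp ((PySem.Set.contains_iff _ k).mp h), pvRel_self k⟩
    · rcases List.any_eq_true.mp h with ⟨a, ha, hrel⟩
      exact ⟨a, (PySem.Set.mem_ofList lows a).mp ha, hrel⟩
  · rintro ⟨a, ha, hrel⟩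
    refine Bool.or_eq_true_iff.mpr (Or.inr (List.any_eq_true.mpr ⟨a, ?_, hrel⟩))
    exact (PySem.Set.mem_ofList lows a).mpr ha

theorem pv_len_empty : PySem.Str.len "" = 0 := by decide

theorem pv_short_iff (k : String) :
    (k = "" ∨ PySem.Str.len k < 3) ↔ ¬ (3 ≤ PySem.Str.len k) := by
  constructor
  · rintro (rfl | h)
    · rw [pv_len_empty]; omega
    · omega
  · intro h; right; omega

-- per-keyword agreement of the two tests, for keywords that survive the length check
theorem pv_ok_eq (lows : List String) (kw : String)
    (hlen : 3 ≤ PySem.Str.len (pvKey kw)) :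
    pvOkA (PySem.Set.ofList lows) kw = pvOkB lows (kw, pvKey kw) := by
  have hshort : ¬ (pvKey kw = "" ∨ PySem.Str.len (pvKey kw) < 3) :=
    fun h => (pv_short_iff _).mp h hlen
  by_cases hex : ∃ a ∈ lows, pvRel (pvKey kw) a = true
  · have h2 := (pv_anyL_iff lows (pvKey kw)).mpr hex
    have hA : pvOkA (PySem.Set.ofList lows) kw = false := by
      rw [pvOkA, h2]
      simp only [Bool.not_true, Bool.and_false]
    have hB : pvOkB lows (kw, pvKey kw) = false := by
      rcases hex with ⟨a, ha, hrel⟩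
      simp only [pvOkB]
      refine List.all_eq_false.mpr ⟨a, ha, ?_⟩
      simp [hrel]
    rw [hA, hB]
  · have h2 : (PySem.Set.contains (PySem.Set.ofList lows) (pvKey kw) ||
        (PySem.Set.ofList lows).any (fun a => pvRel (pvKey kw) a)) = false :=
      Bool.eq_false_iff.mpr (fun h => hex ((pv_anyL_iff _ _).mp h))
    have hA : pvOkA (PySem.Set.ofList lows) kw = true := by
      rw [pvOkA, decide_eq_false hshort, h2]
      simp only [Bool.not_false, Bool.and_self]
    have hB : pvOkB lows (kw, pvKey kw) = true := by
      simp only [pvOkB]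
      refine List.all_eq_true.mpr (fun a ha => ?_)
      have hr : pvRel (pvKey kw) a = false :=
        Bool.eq_false_iff.mpr (fun hr => hex ⟨a, ha, hr⟩)
      simp [hr]
    rw [hA, hB]

-- the two filtered lists coincide
theorem pv_filter_map (lows : List String) (jd : List String) :
    jd.filter (pvOkA (PySem.Set.ofList lows))
      = ((jd.filterMap pvPend).filter (pvOkB lows)).map Prod.fst := by
  induction jd with
  | nil => rfl
  | cons kw rest ih =>
    rw [List.filter_cons, List.filterMap_cons]
    by_cases hlen : 3 ≤ PySem.Str.len (pvKey kw)
    · have hp : pvPend kw = some (kw, pvKey kw) := by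
        rw [pvPend, if_pos hlen]
      rw [hp, List.filter_cons, pv_ok_eq lows kw hlen]
      by_cases hok : pvOkB lows (kw, pvKey kw) = true
      · rw [if_pos hok, if_pos hok, List.map_cons, ih]
      · rw [if_neg hok, if_neg hok, ih]
    · have hA : pvOkA (PySem.Set.ofList lows) kw = false := by
        rw [pvOkA, decide_eq_true ((pv_short_iff _).mpr hlen)]
        simp only [Bool.not_true, Bool.false_and]
      have hp : pvPend kw = none := by
        rw [pvPend, if_neg hlen]
      rw [hp, hA, ih]
      simp only [Bool.false_eq_true, if_false]

-- ===== VERDICT (by name: the statement is the Claim_ definition above) =====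
theorem get_unsupported_requirements_spec : Claim_equal_get_unsupported_requirements := by
  intro jd mi _
  unfold Spec_get_unsupported_requirements
  simp only [get_unsupported_requirements, get_unsupported_requirements_alt]
  rw [pv_bodyA, pv_foldA, pv_sieve, List.nil_append]
  have hp : (fun (kw : String) =>
      let k := PySem.Str.strip (PySem.Str.lower kw)
      if 3 ≤ PySem.Str.len k then some (kw, k) else none) = pvPend := rfl
  rw [hp]
  exact pv_filter_map _ jd
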